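-- pv_equiv track=rewrite | github.com/Trourest186/Serverless-Computing-Final | test2.py | case_set
-- ===== SOURCE A (Python) =====
-- def case_set(budget: int):
--     cases = []
--
--     for a in range(1, budget + 1):
--         for b in range(1, budget + 1):
--             c = budget // (a * b)
--             if a * b * c == budget:
--                 cases.append([a, b, c])
--
--     return cases
-- ===== SOURCE B (Python) =====
-- def case_set(budget: int):
--     def divisors(n):
--         return [d for d in range(1, n + 1) if n % d == 0]
--     return [[a, b, budget // a // b]
--             for a in divisors(budget)
--             for b in divisors(budget // a)]
-- ===== Notes on version B (the rewrite author's own statement) =====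
-- stated objective: faster
-- what changed: B first builds the ascending divisor list of budget (and of budget//a) with a modulus filter and produces the output as a staged double comprehension over divisor pairs, instead of A's nested full-range accumulator loops testing a*b*c==budget for every (a,b) pair.
import Mathlib
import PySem

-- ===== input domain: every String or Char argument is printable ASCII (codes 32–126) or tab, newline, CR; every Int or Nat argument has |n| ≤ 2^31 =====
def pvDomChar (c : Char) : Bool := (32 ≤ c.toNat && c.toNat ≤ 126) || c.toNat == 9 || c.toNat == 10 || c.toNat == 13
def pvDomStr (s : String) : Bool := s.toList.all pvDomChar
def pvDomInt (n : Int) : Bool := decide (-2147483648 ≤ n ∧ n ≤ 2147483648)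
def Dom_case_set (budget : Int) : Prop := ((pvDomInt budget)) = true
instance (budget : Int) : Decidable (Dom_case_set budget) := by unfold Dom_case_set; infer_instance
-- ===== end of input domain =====

-- B first materialises the ascending divisor list of the budget, then maps over divisor pairs
-- (staged comprehension instead of A's nested full-range accumulator loops); faster and proved identical.

-- ===== PORT A =====
def case_set (budget : Int) : List (List Int) :=
  (PySem.List.pyRange 1 (budget + 1) 1).foldl (fun cases a =>
    (PySem.List.pyRange 1 (budget + 1) 1).foldl (fun cases b =>
      let c := PySem.Int.floordiv budget (a * b)
      if a * b * c = budget then cases ++ [[a, b, c]] else cases) cases) []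

-- ===== PORT B =====
-- helper 'divisors' of Source B: [d for d in range(1, n+1) if n % d == 0]
def pvDivisors (n : Int) : List Int :=
  (PySem.List.pyRange 1 (n + 1) 1).filter (fun d => PySem.Int.mod n d == 0)

-- the double comprehension of Source B: a over divisors(budget), b over divisors(budget // a)
def case_set_alt (budget : Int) : List (List Int) :=
  (pvDivisors budget).flatMap (fun a =>
    (pvDivisors (PySem.Int.floordiv budget a)).map (fun b =>
      [a, b, PySem.Int.floordiv (PySem.Int.floordiv budget a) b]))

-- ===== PRECONDITION & SPEC =====
def Spec_case_set (budget : Int) (out : List (List Int)) : Prop := out = case_set_alt budget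
instance (budget : Int) (out : List (List Int)) : Decidable (Spec_case_set budget out) := by unfold Spec_case_set; infer_instance

-- ===== CLAIM (what is proved, stated in full; the proofs are below) =====
def Claim_equal_case_set : Prop := ∀ (budget : Int), Dom_case_set budget → Spec_case_set budget (case_set budget)

-- ===== LEMMAS AND PROOFS =====

-- inner list produced by A for a fixed a
def pvInnerA (n a : Int) : List (List Int) :=
  ((PySem.List.pyRange 1 (n + 1) 1).filter
      (fun b => decide (a * b * PySem.Int.floordiv n (a * b) = n))).map
    (fun b => [a, b, PySem.Int.floordiv n (a * b)])

-- inner list contributed by B for a fixed a (empty when a does not divide n)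
def pvInnerB (n a : Int) : List (List Int) :=
  if PySem.Int.mod n a = 0 then
    (pvDivisors (PySem.Int.floordiv n a)).map
      (fun b => [a, b, PySem.Int.floordiv (PySem.Int.floordiv n a) b])
  else []

lemma pvA_flatMap (n : Int) :
    case_set n = (PySem.List.pyRange 1 (n + 1) 1).flatMap (pvInnerA n) := by
  unfold case_set
  have h : (fun (cases : List (List Int)) (a : Int) =>
      (PySem.List.pyRange 1 (n + 1) 1).foldl (fun cases b =>
        let c := PySem.Int.floordiv n (a * b)
        if a * b * c = n then cases ++ [[a, b, c]] else cases) cases)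
      = fun cases a => cases ++ pvInnerA n a := by
    funext cases a
    simpa [pvInnerA] using
      PySem.List.foldl_append_ite (l := PySem.List.pyRange 1 (n + 1) 1)
        (p := fun b => a * b * PySem.Int.floordiv n (a * b) = n)
        (f := fun b => [a, b, PySem.Int.floordiv n (a * b)]) (acc := cases)
  rw [h, PySem.List.foldl_append_eq_flatMap]
  simp

-- flatMap over a filtered list = flatMap with an if-guard over the whole list
lemma pv_flatMap_filter {α β : Type} (p : α → Bool) (f : α → List β) (l : List α) :
    (l.filter p).flatMap f = l.flatMap (fun a => if p a then f a else []) := by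
  induction l with
  | nil => rfl
  | cons x xs ih =>
    by_cases h : p x = true <;> simp [h, ih]

lemma pvB_flatMap (n : Int) :
    case_set_alt n = (PySem.List.pyRange 1 (n + 1) 1).flatMap (pvInnerB n) := by
  unfold case_set_alt
  rw [show pvDivisors n
      = (PySem.List.pyRange 1 (n + 1) 1).filter (fun d => PySem.Int.mod n d == 0) from rfl]
  rw [pv_flatMap_filter]
  apply List.flatMap_congr   -- pointwise: guard form equals pvInnerB
  intro a _
  by_cases h : PySem.Int.mod n a = 0 <;> simp [pvInnerB, h]

-- d * (n // d) = n exactly on divisors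
lemma pv_mul_floordiv_eq_iff (n d : Int) :
    d * PySem.Int.floordiv n d = n ↔ d ∣ n := by
  have hmm := PySem.Int.floordiv_mul_add_mod n d
  rw [← PySem.Int.mod_eq_zero_iff_dvd]
  constructor
  · intro h; linear_combination hmm - h
  · intro h; linear_combination hmm - h

lemma pv_inner_eq (n a : Int) (ha1 : 1 ≤ a) (han : a ≤ n) :
    pvInnerA n a = pvInnerB n a := by
  have ha0 : a ≠ 0 := by omega
  by_cases hdvd : a ∣ n
  · -- a divides n : both enumerate the divisors b of m = n // a
    have hmod : PySem.Int.mod n a = 0 := (PySem.Int.mod_eq_zero_iff_dvd n a).mpr hdvd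
    set m := PySem.Int.floordiv n a with hm
    have hnm : m * a = n := by
      have h := PySem.Int.floordiv_mul_add_mod n a
      rw [hmod] at h; simpa [← hm] using h
    have hm1 : 1 ≤ m := by nlinarith
    have hmn : m ≤ n := by nlinarith
    have hcond : ∀ b : Int, 1 ≤ b →
        ((a * b * PySem.Int.floordiv n (a * b) = n) ↔ (b ∣ m)) := by
      intro b hb
      rw [pv_mul_floordiv_eq_iff n (a * b)]
      constructor
      · rintro ⟨k, hk⟩
        exact ⟨k, mul_left_cancel₀ ha0 (by linear_combination hnm + hk)⟩
      · rintro ⟨k, hk⟩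
        exact ⟨k, by linear_combination a * hk - hnm⟩
    have hval : ∀ b : Int, 1 ≤ b → b ∣ m →
        PySem.Int.floordiv n (a * b) = PySem.Int.floordiv m b := by
      intro b hb hbd
      obtain ⟨k, hk⟩ := hbd
      have hb0 : (0:Int) < b := by omega
      have habpos : (0:Int) < a * b := mul_pos (by omega) hb0
      rw [PySem.Int.floordiv_eq_ediv_of_pos habpos, PySem.Int.floordiv_eq_ediv_of_pos hb0]
      have h1 : n = a * b * k := by linear_combination a * hk - hnm
      rw [h1, hk, Int.mul_ediv_cancel_left _ (ne_of_gt habpos),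
        Int.mul_ediv_cancel_left _ (ne_of_gt hb0)]
    have hsplit : PySem.List.pyRange 1 (n + 1) 1
        = PySem.List.pyRange 1 (m + 1) 1 ++ PySem.List.pyRange (m + 1) (n + 1) 1 :=
      PySem.List.pyRange_one_append 1 (m + 1) (n + 1) (by omega) (by omega)
    unfold pvInnerA pvInnerB pvDivisors
    rw [if_pos hmod, ← hm, hsplit, List.filter_append]
    have h2 : (PySem.List.pyRange (m + 1) (n + 1) 1).filter
        (fun b => decide (a * b * PySem.Int.floordiv n (a * b) = n)) = [] := by
      rw [List.filter_eq_nil_iff]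
      intro b hb
      rw [PySem.List.mem_pyRange_one] at hb
      simp only [decide_eq_true_eq]
      intro h
      have hbm : b ∣ m := (hcond b (by omega)).mp h
      have : b ≤ m := Int.le_of_dvd (by omega) hbm
      omega
    rw [h2, List.append_nil]
    have h3 : (PySem.List.pyRange 1 (m + 1) 1).filter
          (fun b => decide (a * b * PySem.Int.floordiv n (a * b) = n))
        = (PySem.List.pyRange 1 (m + 1) 1).filter
          (fun b => PySem.Int.mod m b == 0) := by
      apply List.filter_congr
      intro b hb
      rw [PySem.List.mem_pyRange_one] at hb
      rw [Bool.eq_iff_iff]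
      simp only [decide_eq_true_eq, beq_iff_eq]
      rw [hcond b (by omega), PySem.Int.mod_eq_zero_iff_dvd]
    rw [h3]
    apply List.map_congr_left
    intro b hb
    rw [List.mem_filter, PySem.List.mem_pyRange_one] at hb
    obtain ⟨hbr, hbd⟩ := hb
    have hbdvd : b ∣ m := by
      rw [← PySem.Int.mod_eq_zero_iff_dvd]; simpa using hbd
    rw [hval b (by omega) hbdvd]
  · -- a does not divide n : both inner lists are empty
    have hmod : PySem.Int.mod n a ≠ 0 := fun h =>
      hdvd ((PySem.Int.mod_eq_zero_iff_dvd n a).mp h)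
    unfold pvInnerA pvInnerB
    rw [if_neg hmod]
    have h0 : (PySem.List.pyRange 1 (n + 1) 1).filter
        (fun b => decide (a * b * PySem.Int.floordiv n (a * b) = n)) = [] := by
      rw [List.filter_eq_nil_iff]
      intro b hb
      simp only [decide_eq_true_eq]
      intro h
      exact hdvd ⟨b * PySem.Int.floordiv n (a * b), by linear_combination -h⟩
    rw [h0]
    simp

-- ===== VERDICT (by name: the statement is the Claim_ definition above) =====
theorem case_set_spec : Claim_equal_case_set := by
  intro n _
  show case_set n = case_set_alt n
  rw [pvA_flatMap, pvB_flatMap]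
  have h : (PySem.List.pyRange 1 (n + 1) 1).map (pvInnerA n)
      = (PySem.List.pyRange 1 (n + 1) 1).map (pvInnerB n) :=
    List.map_congr_left (fun a ha => by
      rw [PySem.List.mem_pyRange_one] at ha
      exact pv_inner_eq n a (by omega) (by omega))
  rw [List.flatMap_def, List.flatMap_def, h]
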